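-- pv_equiv track=rewrite | github.com/defrancisco/ThePythonFiles | algoritmoyestructuradedatosI/primerparcial/prácticas - patron especial de relleno.py | rellenoespecial
-- ===== SOURCE A (Python) =====
-- def rellenoespecial(m):
--     mitad = len(m) // 2
--     for f in range(mitad):
--         for c in range(mitad):
--             # Primer cuadrante
--             m[f][c] = 1
--             # Segundo cuadrante
--             m[f][c+mitad] = 2
--             # Tercer cuadrante
--             m[f+mitad][c] = 3
--             # Cuarto cuadrante
--             m[f+mitad][c+mitad] = 4
--     return m
-- ===== SOURCE B (Python) =====
-- def rellenoespecial(m):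
--     mitad = len(m) // 2
--     for f, fila in enumerate(m[:2 * mitad]):
--         b = 1 if f < mitad else 3
--         fila[:2 * mitad] = [b] * mitad + [b + 1] * mitad
--     return m
-- ===== Notes on version B (the rewrite author's own statement) =====
-- stated objective: simpler
-- what changed: Replaces A's nested quarter-loop with four mirrored per-cell writes by a single row-wise pass that overwrites each covered row's prefix with one precomputed slice [b]*mitad+[b+1]*mitad (b=1 or 3 depending on the half).
import Mathlib
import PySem

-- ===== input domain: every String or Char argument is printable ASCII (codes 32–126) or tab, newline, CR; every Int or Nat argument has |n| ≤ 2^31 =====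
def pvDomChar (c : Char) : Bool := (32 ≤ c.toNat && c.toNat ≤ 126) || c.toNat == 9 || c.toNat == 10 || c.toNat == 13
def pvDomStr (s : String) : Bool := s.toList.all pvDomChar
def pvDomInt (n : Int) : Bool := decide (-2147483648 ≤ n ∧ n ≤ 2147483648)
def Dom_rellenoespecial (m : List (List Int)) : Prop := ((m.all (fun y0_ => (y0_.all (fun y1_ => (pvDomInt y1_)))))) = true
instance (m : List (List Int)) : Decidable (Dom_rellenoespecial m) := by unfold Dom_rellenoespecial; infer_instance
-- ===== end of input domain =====

-- B replaces A's nested quarter-loop with four mirrored per-cell writes by one row-wise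
-- pass overwriting each covered row's prefix with a precomputed segment (objective: simpler).
-- A and B both mutate m in place in Python; the equivalence proved here is about the return value.

-- ===== PORT A =====
-- m[f][c] = v  (in-range on every input admitted by Pre_; List.set is a no-op out of range,
-- where the Python raises IndexError — those inputs are excluded by Pre_rellenoespecial)
def setCell (m : List (List Int)) (f c : Nat) (v : Int) : List (List Int) :=
  m.set f ((m.getD f []).set c v)

def rellenoespecial (m : List (List Int)) : List (List Int) :=
  let mitad := m.length / 2
  (List.range mitad).foldl (fun acc f =>
    (List.range mitad).foldl (fun acc c =>
      setCell (setCell (setCell (setCell acc f c 1) f (c + mitad) 2)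
        (f + mitad) c 3) (f + mitad) (c + mitad) 4) acc) m

-- ===== PORT B =====
-- for f, fila in enumerate(m[:2*mitad]): fila[:2*mitad] = [b]*mitad + [b+1]*mitad; return m
def rellenoespecial_alt (m : List (List Int)) : List (List Int) :=
  let mitad := m.length / 2
  ((m.take (2 * mitad)).mapIdx (fun f fila =>
    let b : Int := if f < mitad then 1 else 3
    (List.replicate mitad b ++ List.replicate mitad (b + 1)) ++ fila.drop (2 * mitad)))
  ++ m.drop (2 * mitad)

-- ===== PRECONDITION & SPEC =====
-- Pre_ excludes exactly the inputs on which A raises IndexError: some row among the first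
-- 2*(len(m)//2) rows is shorter than 2*(len(m)//2).
def Pre_rellenoespecial (m : List (List Int)) : Prop :=
  ∀ i < 2 * (m.length / 2), 2 * (m.length / 2) ≤ (m.getD i []).length
instance (m : List (List Int)) : Decidable (Pre_rellenoespecial m) := by
  unfold Pre_rellenoespecial; infer_instance
def pvWitness_rellenoespecial : List (List Int) := [[0, 0], [0, 0]]

def Spec_rellenoespecial (m : List (List Int)) (out : List (List Int)) : Prop := out = rellenoespecial_alt m
instance (m : List (List Int)) (out : List (List Int)) : Decidable (Spec_rellenoespecial m out) := by unfold Spec_rellenoespecial; infer_instance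

-- ===== CLAIM (what is proved, stated in full; the proofs are below) =====
def Claim_equal_rellenoespecial : Prop := ∀ (m : List (List Int)), Dom_rellenoespecial m → Pre_rellenoespecial m → Spec_rellenoespecial m (rellenoespecial m)
-- ===== LEMMAS AND PROOFS =====

-- value at cell (i, j), default 0
def gcell (m : List (List Int)) (i j : Nat) : Int := (m.getD i []).getD j 0

theorem length_setCell (m : List (List Int)) (f c : Nat) (v : Int) :
    (setCell m f c v).length = m.length := by
  simp [setCell]

theorem getD_setCell (m : List (List Int)) (f c : Nat) (v : Int) (i : Nat) :
    (setCell m f c v).getD i [] =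
      if i = f ∧ f < m.length then (m.getD f []).set c v else m.getD i [] := by
  unfold setCell
  rcases Nat.lt_or_ge f m.length with hf | hf
  · simp only [List.getD_eq_getElem?_getD, List.getElem?_set]
    by_cases h : i = f
    · subst h; simp [hf]
    · simp [Ne.symm h, h]
  · rw [List.set_eq_of_length_le hf]
    simp [Nat.not_lt_of_ge hf]

theorem rowlen_setCell (m : List (List Int)) (f c : Nat) (v : Int) (i : Nat) :
    ((setCell m f c v).getD i []).length = (m.getD i []).length := by
  rw [getD_setCell]
  split_ifs with h
  · rw [List.length_set, h.1]
  · rfl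

theorem gcell_setCell (m : List (List Int)) (f c : Nat) (v : Int)
    (hf : f < m.length) (hc : c < (m.getD f []).length) (i j : Nat) :
    gcell (setCell m f c v) i j = if i = f ∧ j = c then v else gcell m i j := by
  unfold gcell
  rw [getD_setCell]
  by_cases hi : i = f
  · subst hi
    simp only [hf, and_true, if_pos trivial, true_and]
    simp only [List.getD_eq_getElem?_getD, List.getElem?_set]
    by_cases hj : j = c
    · subst hj
      rw [if_pos rfl, if_pos (by simpa [List.getD_eq_getElem?_getD] using hc)]
      simp
    · simp [Ne.symm hj, hj]
  · simp [hi]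

-- the inner-loop body of A
def stepA (mitad : Nat) (f : Nat) (acc : List (List Int)) (c : Nat) : List (List Int) :=
  setCell (setCell (setCell (setCell acc f c 1) f (c + mitad) 2)
    (f + mitad) c 3) (f + mitad) (c + mitad) 4

theorem length_stepA (mitad f : Nat) (acc : List (List Int)) (c : Nat) :
    (stepA mitad f acc c).length = acc.length := by
  simp [stepA, length_setCell]

theorem rowlen_stepA (mitad f : Nat) (acc : List (List Int)) (c i : Nat) :
    ((stepA mitad f acc c).getD i []).length = ((acc.getD i []).length) := by
  unfold stepA
  rw [rowlen_setCell, rowlen_setCell, rowlen_setCell, rowlen_setCell]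

def innerA (mitad f n : Nat) (acc : List (List Int)) : List (List Int) :=
  (List.range n).foldl (stepA mitad f) acc

theorem innerA_succ (mitad f n : Nat) (acc : List (List Int)) :
    innerA mitad f (n + 1) acc = stepA mitad f (innerA mitad f n acc) n := by
  unfold innerA
  rw [List.range_succ, List.foldl_append, List.foldl_cons, List.foldl_nil]

theorem length_innerA (mitad f n : Nat) (acc : List (List Int)) :
    (innerA mitad f n acc).length = acc.length := by
  induction n with
  | zero => rfl
  | succ n ih => rw [innerA_succ, length_stepA, ih]

theorem rowlen_innerA (mitad f n : Nat) (acc : List (List Int)) (i : Nat) :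
    ((innerA mitad f n acc).getD i []).length = (acc.getD i []).length := by
  induction n with
  | zero => rfl
  | succ n ih => rw [innerA_succ, rowlen_stepA, ih]

theorem gcell_stepA (mitad f : Nat) (acc : List (List Int)) (c : Nat)
    (hm : 0 < mitad) (hf : f < acc.length) (hf2 : f + mitad < acc.length)
    (hc1 : c + mitad < (acc.getD f []).length)
    (hc2 : c + mitad < (acc.getD (f + mitad) []).length) (i j : Nat) :
    gcell (stepA mitad f acc c) i j =
      if i = f ∧ j = c then 1
      else if i = f ∧ j = c + mitad then 2
      else if i = f + mitad ∧ j = c then 3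
      else if i = f + mitad ∧ j = c + mitad then 4
      else gcell acc i j := by
  unfold stepA
  have hc : c < (acc.getD f []).length := Nat.lt_of_le_of_lt (Nat.le_add_right _ _) hc1
  have hc' : c < (acc.getD (f + mitad) []).length := Nat.lt_of_le_of_lt (Nat.le_add_right _ _) hc2
  rw [gcell_setCell _ _ _ _
      (by rw [length_setCell, length_setCell, length_setCell]; exact hf2)
      (by rw [rowlen_setCell, rowlen_setCell, rowlen_setCell]; exact hc2),
    gcell_setCell _ _ _ _
      (by rw [length_setCell, length_setCell]; exact hf2)
      (by rw [rowlen_setCell, rowlen_setCell]; exact hc'),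
    gcell_setCell _ _ _ _
      (by rw [length_setCell]; exact hf)
      (by rw [rowlen_setCell]; exact hc1),
    gcell_setCell _ _ _ _ hf hc]
  split_ifs <;> first | rfl | omega

-- characterisation of A's inner loop
theorem gcell_innerA (mitad f : Nat) (acc : List (List Int)) (n : Nat) (hn : n ≤ mitad)
    (hf : f + mitad < acc.length)
    (hr1 : 2 * mitad ≤ (acc.getD f []).length)
    (hr2 : 2 * mitad ≤ (acc.getD (f + mitad) []).length) (i j : Nat) :
    gcell (innerA mitad f n acc) i j =
      if i = f ∧ j < n then 1
      else if i = f ∧ mitad ≤ j ∧ j < mitad + n then 2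
      else if i = f + mitad ∧ j < n then 3
      else if i = f + mitad ∧ mitad ≤ j ∧ j < mitad + n then 4
      else gcell acc i j := by
  induction n with
  | zero =>
      simp only [innerA, List.range_zero, List.foldl_nil]
      split_ifs <;> first | rfl | omega
  | succ n ih =>
      have hn' : n ≤ mitad := Nat.le_of_succ_le hn
      rw [innerA_succ]
      rw [gcell_stepA mitad f _ n (by omega)
        (by rw [length_innerA]; omega)
        (by rw [length_innerA]; exact hf)
        (by rw [rowlen_innerA]; omega)
        (by rw [rowlen_innerA]; omega)]
      rw [ih hn']
      split_ifs <;> first | rfl | omega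

def outerA (mitad n : Nat) (acc : List (List Int)) : List (List Int) :=
  (List.range n).foldl (fun acc f => innerA mitad f mitad acc) acc

theorem outerA_succ (mitad n : Nat) (acc : List (List Int)) :
    outerA mitad (n + 1) acc = innerA mitad n mitad (outerA mitad n acc) := by
  unfold outerA
  rw [List.range_succ, List.foldl_append, List.foldl_cons, List.foldl_nil]

theorem length_outerA (mitad n : Nat) (acc : List (List Int)) :
    (outerA mitad n acc).length = acc.length := by
  induction n with
  | zero => rfl
  | succ n ih => rw [outerA_succ, length_innerA, ih]

theorem rowlen_outerA (mitad n : Nat) (acc : List (List Int)) (i : Nat) :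
    ((outerA mitad n acc).getD i []).length = (acc.getD i []).length := by
  induction n with
  | zero => rfl
  | succ n ih => rw [outerA_succ, rowlen_innerA, ih]

-- characterisation of A's full double loop
theorem gcell_outerA (mitad : Nat) (acc : List (List Int)) (n : Nat) (hn : n ≤ mitad)
    (hlen : 2 * mitad ≤ acc.length)
    (hr : ∀ i < 2 * mitad, 2 * mitad ≤ (acc.getD i []).length) (i j : Nat) :
    gcell (outerA mitad n acc) i j =
      if i < n ∧ j < mitad then 1
      else if i < n ∧ mitad ≤ j ∧ j < 2 * mitad then 2
      else if mitad ≤ i ∧ i < mitad + n ∧ j < mitad then 3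
      else if mitad ≤ i ∧ i < mitad + n ∧ mitad ≤ j ∧ j < 2 * mitad then 4
      else gcell acc i j := by
  induction n with
  | zero =>
      simp only [outerA, List.range_zero, List.foldl_nil]
      split_ifs <;> first | rfl | omega
  | succ n ih =>
      have hn' : n ≤ mitad := Nat.le_of_succ_le hn
      rw [outerA_succ]
      rw [gcell_innerA mitad n _ mitad le_rfl
        (by rw [length_outerA]; omega)
        (by rw [rowlen_outerA]; exact hr n (by omega))
        (by rw [rowlen_outerA]; exact hr (n + mitad) (by omega))]
      rw [ih hn']
      split_ifs <;> first | rfl | omega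

theorem rellenoespecial_eq_outerA (m : List (List Int)) :
    rellenoespecial m = outerA (m.length / 2) (m.length / 2) m := rfl

-- bridges between getElem and getD
theorem getElem_eq_getD_int (L : List Int) (j : Nat) (h : j < L.length) :
    L[j]'h = L.getD j 0 := by
  rw [List.getD_eq_getElem?_getD, List.getElem?_eq_getElem h]; rfl

theorem getElem_eq_getD_row (M : List (List Int)) (i : Nat) (h : i < M.length) :
    M[i]'h = M.getD i [] := by
  rw [List.getD_eq_getElem?_getD, List.getElem?_eq_getElem h]; rfl

-- B's result, row i
theorem getD_alt (m : List (List Int)) (mitad : Nat) (hm : mitad = m.length / 2) (i : Nat) :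
    (rellenoespecial_alt m).getD i [] =
      if i < 2 * mitad then
        (List.replicate mitad (if i < mitad then (1 : Int) else 3) ++
         List.replicate mitad ((if i < mitad then (1 : Int) else 3) + 1)) ++
          (m.getD i []).drop (2 * mitad)
      else m.getD i [] := by
  have h2 : 2 * mitad ≤ m.length := by omega
  unfold rellenoespecial_alt
  rw [← hm]
  by_cases hi : i < 2 * mitad
  · have hi' : i < m.length := by omega
    rw [List.getD_eq_getElem?_getD, List.getElem?_append_left
        (by simp only [List.length_mapIdx, List.length_take]; omega)]
    rw [List.getElem?_mapIdx]
    rw [List.getElem?_take_of_lt hi, List.getElem?_eq_getElem hi']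
    simp only [Option.map_some, Option.getD_some, if_pos hi]
    rw [getElem_eq_getD_row m i hi']
  · rw [List.getD_eq_getElem?_getD, List.getElem?_append_right
        (by simp only [List.length_mapIdx, List.length_take]; omega)]
    simp only [List.length_mapIdx, List.length_take, Nat.min_eq_left h2]
    rw [List.getElem?_drop]
    have hx : 2 * mitad + (i - 2 * mitad) = i := by omega
    rw [hx, if_neg hi, List.getD_eq_getElem?_getD]

theorem length_alt (m : List (List Int)) : (rellenoespecial_alt m).length = m.length := by
  unfold rellenoespecial_alt
  simp only [List.length_append, List.length_mapIdx, List.length_take, List.length_drop]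
  omega

theorem rows_eq (m : List (List Int)) (h : Pre_rellenoespecial m) (i : Nat) :
    (rellenoespecial m).getD i [] = (rellenoespecial_alt m).getD i [] := by
  obtain ⟨mitad, hm⟩ : ∃ k, k = m.length / 2 := ⟨_, rfl⟩
  have h2 : 2 * mitad ≤ m.length := by omega
  have hr : ∀ k, k < 2 * mitad → 2 * mitad ≤ (m.getD k []).length := by
    intro k hk
    have := h k (by omega)
    omega
  have hA := rellenoespecial_eq_outerA m
  rw [← hm] at hA
  have hlenA : ((rellenoespecial m).getD i []).length = (m.getD i []).length := by
    rw [hA]; exact rowlen_outerA _ _ _ _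
  rw [getD_alt m mitad hm i]
  by_cases hi : i < 2 * mitad
  · have hri := hr i hi
    rw [if_pos hi]
    apply List.ext_getElem
    · rw [hlenA]
      simp only [List.length_append, List.length_replicate, List.length_drop]
      omega
    · intro j hj1 hj2
      have hj : j < (m.getD i []).length := by rw [← hlenA]; exact hj1
      rw [getElem_eq_getD_int _ _ hj1]
      have hg : ((rellenoespecial m).getD i []).getD j 0 = gcell (rellenoespecial m) i j := rfl
      rw [hg, hA, gcell_outerA mitad m mitad le_rfl h2 hr i j]
      by_cases hjlt : j < 2 * mitad
      · rw [List.getElem_append_left (by simp only [List.length_append, List.length_replicate]; omega)]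
        by_cases hj1' : j < mitad
        · rw [List.getElem_append_left (by simp only [List.length_replicate]; omega)]
          rw [List.getElem_replicate]
          split_ifs <;> omega
        · rw [List.getElem_append_right (by simp only [List.length_replicate]; omega)]
          rw [List.getElem_replicate]
          split_ifs <;> omega
      · rw [List.getElem_append_right (by simp only [List.length_append, List.length_replicate]; omega)]
        rw [getElem_eq_getD_int]
        simp only [List.length_append, List.length_replicate]
        have hd : ((m.getD i []).drop (2 * mitad)).getD (j - (mitad + mitad)) 0 =
            (m.getD i []).getD (2 * mitad + (j - (mitad + mitad))) 0 := by
          rw [List.getD_eq_getElem?_getD, List.getD_eq_getElem?_getD, List.getElem?_drop]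
          rfl
        rw [hd]
        have hjj : 2 * mitad + (j - (mitad + mitad)) = j := by omega
        rw [hjj]
        have hg2 : (m.getD i []).getD j 0 = gcell m i j := rfl
        rw [hg2]
        split_ifs <;> first | rfl | omega
  · rw [if_neg hi]
    apply List.ext_getElem
    · rw [hlenA]
    · intro j hj1 hj2
      rw [getElem_eq_getD_int _ _ hj1, getElem_eq_getD_int _ _ hj2]
      have hg : ((rellenoespecial m).getD i []).getD j 0 = gcell (rellenoespecial m) i j := rfl
      have hg2 : (m.getD i []).getD j 0 = gcell m i j := rfl
      rw [hg, hg2, hA, gcell_outerA mitad m mitad le_rfl h2 hr i j]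
      split_ifs <;> first | rfl | omega

-- ===== VERDICT (by name: the statement is the Claim_ definition above) =====
theorem rellenoespecial_spec : Claim_equal_rellenoespecial := by
  intro m _ hpre
  unfold Spec_rellenoespecial
  apply List.ext_getElem
  · rw [rellenoespecial_eq_outerA, length_outerA, length_alt]
  · intro i hi1 hi2
    rw [getElem_eq_getD_row _ _ hi1, getElem_eq_getD_row _ _ hi2]
    exact rows_eq m hpre i
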